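-- pv_equiv track=rewrite | github.com/mmetsa/PythonProjects | ex07_minesweeper/minesweeper.py | add_mines
-- ===== SOURCE A (Python) =====
-- import copy
--
-- def add_mines(minefield: list, mines: list) -> list:
--     """
--     Add mines to a minefield and return minefield.
--
--     This function cannot modify the original minefield list.
--     Minefield must be length long and width wide. Each non-mine position must contain single dot.
--     If a position is empty ("."), then a small mine is added ("x").
--     If a position contains small mine ("x"), a large mine is added ("X").
--     Mines are in a list.
--     Mine is a list. Each mine has 4 integer parameters in the format [N, S, E, W].
--         - N is the distance between area of mines and top of the minefield.
--         - S ... area of mines and bottom of the minefield.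
--         - E ... area of mines and right of the minefield.
--         - W ... area of mines and left of the minefield.
--     :param minefield: list
--     :param mines: list
--     :return: list
--     """
--     new_minefield = copy.deepcopy(minefield)
--     for mine in mines:
--         for row_i in range(mine[0], len(new_minefield) - mine[1]):
--             for col_i in range(mine[3], len(new_minefield[row_i]) - mine[2]):
--                 if new_minefield[row_i][col_i] == ".":
--                     new_minefield[row_i][col_i] = "x"
--                 else:
--                     new_minefield[row_i][col_i] = "X"
--     return new_minefield
-- ===== SOURCE B (Python) =====
-- def add_mines(minefield: list, mines: list) -> list:
--     height = len(minefield)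
--     result = []
--     for r, row in enumerate(minefield):
--         width = len(row)
--         diff = [0] * (width + 1)
--         for mine in mines:
--             if mine[0] <= r < height - mine[1] and mine[3] < width - mine[2]:
--                 diff[mine[3]] += 1
--                 diff[width - mine[2]] -= 1
--         covered = 0
--         new_row = []
--         for c, cell in enumerate(row):
--             covered += diff[c]
--             new_row.append(cell if covered == 0 else
--                            ("x" if covered == 1 and cell == "." else "X"))
--         result.append(new_row)
--     return result
-- ===== Notes on version B (the rewrite author's own statement) =====
-- stated objective: faster
-- what changed: Replaces the per-mine rectangle repainting (an inner loop touching every covered cell once per mine) by a per-row difference array: each mine contributes two endpoint updates per row, a single prefix-sum sweep yields each cell's coverage count, and count plus original cell is mapped directly to the output character.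
import Mathlib
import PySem

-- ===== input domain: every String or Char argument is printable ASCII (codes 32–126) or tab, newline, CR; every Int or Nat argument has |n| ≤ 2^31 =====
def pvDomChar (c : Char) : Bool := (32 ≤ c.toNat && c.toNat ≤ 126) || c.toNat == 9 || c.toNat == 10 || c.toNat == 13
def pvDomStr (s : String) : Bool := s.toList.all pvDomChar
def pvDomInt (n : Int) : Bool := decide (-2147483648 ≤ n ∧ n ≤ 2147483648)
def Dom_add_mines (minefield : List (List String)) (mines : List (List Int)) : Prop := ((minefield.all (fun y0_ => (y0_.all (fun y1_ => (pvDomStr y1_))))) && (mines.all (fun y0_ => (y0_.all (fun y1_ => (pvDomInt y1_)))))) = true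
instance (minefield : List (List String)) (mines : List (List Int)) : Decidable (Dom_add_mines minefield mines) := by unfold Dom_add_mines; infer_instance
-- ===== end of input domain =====

-- B replaces A's per-mine rectangle repainting by a per-row difference array whose
-- prefix-sum coverage count is mapped to the output character (O(mines*area) vs
-- O(rows*mines + cells)). A deep-copies its input and mutates only the copy; neither
-- implementation mutates its arguments.

-- ===== PORT A =====
def add_mines (minefield : List (List String)) (mines : List (List Int)) : List (List String) :=
  mines.foldl (fun nf mine =>
    (PySem.List.pyRange (PySem.List.pyGetD mine 0 0)
        ((nf.length : Int) - PySem.List.pyGetD mine 1 0) 1).foldl (fun nf rowI =>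
      (PySem.List.pyRange (PySem.List.pyGetD mine 3 0)
          (((PySem.List.pyGetD nf rowI []).length : Int) - PySem.List.pyGetD mine 2 0) 1).foldl
        (fun nf colI =>
          let row := PySem.List.pyGetD nf rowI []
          PySem.List.pySetD nf rowI
            (PySem.List.pySetD row colI
              (if PySem.List.pyGetD row colI "" == "." then "x" else "X")))
        nf)
      nf)
    minefield

-- ===== PORT B =====
def add_mines_alt (minefield : List (List String)) (mines : List (List Int)) : List (List String) :=
  let height : Int := minefield.length
  (PySem.List.enumerate minefield 0).foldl (fun result p =>
    let r := p.1
    let row := p.2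
    let width : Int := row.length
    let diff : List Int := mines.foldl (fun diff mine =>
        if PySem.List.pyGetD mine 0 0 ≤ r ∧ r < height - PySem.List.pyGetD mine 1 0 ∧
           PySem.List.pyGetD mine 3 0 < width - PySem.List.pyGetD mine 2 0 then
          let d1 := PySem.List.pySetD diff (PySem.List.pyGetD mine 3 0)
            (PySem.List.pyGetD diff (PySem.List.pyGetD mine 3 0) 0 + 1)
          PySem.List.pySetD d1 (width - PySem.List.pyGetD mine 2 0)
            (PySem.List.pyGetD d1 (width - PySem.List.pyGetD mine 2 0) 0 - 1)
        else diff)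
      (List.replicate (width + 1).toNat 0)
    let rc := (PySem.List.enumerate row 0).foldl (fun (st : Int × List String) q =>
        let covered := st.1 + PySem.List.pyGetD diff q.1 0
        (covered, st.2 ++ [if covered == 0 then q.2
                           else if covered == 1 && q.2 == "." then "x" else "X"]))
      ((0 : Int), ([] : List String))
    result ++ [rc.2]) []

-- ===== PRECONDITION & SPEC =====
-- Pre_ excludes inputs where A's index arithmetic leaves the documented domain: mines with
-- fewer than two entries, or with fewer than four entries / negative distances while some
-- loop range they induce is nonempty; there A raises IndexError or silently wraps around
-- the board via Python negative indexing, which B does not reproduce.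
def Pre_add_mines (minefield : List (List String)) (mines : List (List Int)) : Prop :=
  ∀ m ∈ mines, 2 ≤ m.length ∧
    (((minefield.length : Int) - m.getD 1 0 ≤ m.getD 0 0) ∨
     (4 ≤ m.length ∧ 0 ≤ m.getD 0 0 ∧ 0 ≤ m.getD 1 0 ∧
       ((0 ≤ m.getD 3 0 ∧ 0 ≤ m.getD 2 0) ∨
        ∀ r : Nat, r < minefield.length →
          (m.getD 0 0 ≤ (r : Int) ∧ (r : Int) < (minefield.length : Int) - m.getD 1 0) →
          ((minefield.getD r []).length : Int) - m.getD 2 0 ≤ m.getD 3 0)))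
instance (minefield : List (List String)) (mines : List (List Int)) : Decidable (Pre_add_mines minefield mines) := by unfold Pre_add_mines; infer_instance
def pvWitness_add_mines : List (List String) × List (List Int) :=
  ([[".", "x"], [".", "."]], [[0, 0, 0, 1], [1, 0, 0, 0]])
def Spec_add_mines (minefield : List (List String)) (mines : List (List Int)) (out : List (List String)) : Prop := out = add_mines_alt minefield mines
instance (minefield : List (List String)) (mines : List (List Int)) (out : List (List String)) : Decidable (Spec_add_mines minefield mines out) := by unfold Spec_add_mines; infer_instance

-- ===== CLAIM (what is proved, stated in full; the proofs are below) =====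
def Claim_equal_add_mines : Prop := ∀ (minefield : List (List String)) (mines : List (List Int)), Dom_add_mines minefield mines → Pre_add_mines minefield mines → Spec_add_mines minefield mines (add_mines minefield mines)

-- ===== LEMMAS AND PROOFS =====

def pvTouch (v : String) : String := if v == "." then "x" else "X"
def pvMark (v : String) (k : Int) : String :=
  if k == 0 then v else if k == 1 && v == "." then "x" else "X"

-- the per-mine admissibility condition of Pre_, relative to a concrete field
def pvQA (mf : List (List String)) (m : List Int) : Prop :=
  ((mf.length : Int) - m.getD 1 0 ≤ m.getD 0 0) ∨
  (0 ≤ m.getD 0 0 ∧ 0 ≤ m.getD 1 0 ∧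
    ((0 ≤ m.getD 3 0 ∧ 0 ≤ m.getD 2 0) ∨
     ∀ r : Nat, r < mf.length →
       (m.getD 0 0 ≤ (r : Int) ∧ (r : Int) < (mf.length : Int) - m.getD 1 0) →
       ((mf.getD r []).length : Int) - m.getD 2 0 ≤ m.getD 3 0))

-- pvQA specialised to one row index
def pvQ (H W : Int) (rn : Nat) (m : List Int) : Prop :=
  H - m.getD 1 0 ≤ m.getD 0 0 ∨
  (0 ≤ m.getD 0 0 ∧ 0 ≤ m.getD 1 0 ∧
    ((0 ≤ m.getD 3 0 ∧ 0 ≤ m.getD 2 0) ∨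
     (m.getD 0 0 ≤ (rn : Int) ∧ (rn : Int) < H - m.getD 1 0 → W - m.getD 2 0 ≤ m.getD 3 0)))

lemma pvQA_spec (mf : List (List String)) (m : List Int) (h : pvQA mf m) (r : Nat) :
    pvQ (mf.length : Int) (((mf.getD r []).length : Nat) : Int) r m := by
  unfold pvQA at h
  unfold pvQ
  rcases h with he | ⟨hn, hs, hcc⟩
  · exact Or.inl he
  · refine Or.inr ⟨hn, hs, ?_⟩
    rcases hcc with h23 | hiii
    · exact Or.inl h23
    · refine Or.inr (fun hrow => ?_)
      by_cases hr : r < mf.length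
      · exact hiii r hr hrow
      · exfalso; omega

lemma pv_foldl_id {α β : Type} (f : α → β → α) (l : List β) (a : α)
    (h : ∀ x ∈ l, f a x = a) : l.foldl f a = a := by
  induction l with
  | nil => rfl
  | cons x l ih =>
    rw [List.foldl_cons, h x (by simp)]
    exact ih (fun y hy => h y (by simp [hy]))

lemma pvTouch_X (k : Nat) : pvTouch^[k] "X" = "X" := by
  induction k with
  | zero => rfl
  | succ k ih => rw [Function.iterate_succ_apply, show pvTouch "X" = "X" from rfl, ih]

lemma pvTouch_touch (v : String) : pvTouch (pvTouch v) = "X" := by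
  unfold pvTouch
  by_cases h : v == "." <;> simp [h]

lemma pvTouch_iterate (v : String) (k : Nat) :
    pvTouch^[k] v = pvMark v (k : Nat) := by
  match k with
  | 0 => simp [pvMark]
  | 1 =>
    simp only [Function.iterate_one, pvMark, pvTouch]
    by_cases h : v == "." <;> simp [h]
  | (k + 2) =>
    rw [Function.iterate_succ_apply, Function.iterate_succ_apply, pvTouch_touch, pvTouch_X]
    simp only [pvMark, beq_iff_eq, Bool.and_eq_true]
    rw [if_neg (by push_cast; omega), if_neg (by rintro ⟨h, -⟩; push_cast at h; omega)]

lemma pv_colfold_char (l : List Int) (hnd : l.Nodup) (hnn : ∀ i ∈ l, 0 ≤ i) (row : List String) :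
    (l.foldl (fun row colI => PySem.List.pySetD row colI
        (if PySem.List.pyGetD row colI "" == "." then "x" else "X")) row).length = row.length ∧
    ∀ c : Nat, (l.foldl (fun row colI => PySem.List.pySetD row colI
        (if PySem.List.pyGetD row colI "" == "." then "x" else "X")) row).getD c "" =
      if (c : Int) ∈ l ∧ c < row.length then pvTouch (row.getD c "") else row.getD c "" := by
  induction l generalizing row with
  | nil => simp
  | cons i l ih =>
    obtain ⟨hil, hnd'⟩ := List.nodup_cons.mp hnd
    have hi : 0 ≤ i := hnn i (by simp)
    have hnn' : ∀ j ∈ l, 0 ≤ j := fun j hj => hnn j (by simp [hj])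
    rw [List.foldl_cons]
    have hstep : PySem.List.pySetD row i
        (if PySem.List.pyGetD row i "" == "." then "x" else "X")
        = row.set i.toNat (pvTouch (PySem.List.pyGetD row i "")) := by
      simp only [pvTouch]
      rw [PySem.List.pySetD_of_nonneg row _ hi]
    rw [hstep]
    obtain ⟨ihlen, ihget⟩ := ih hnd' hnn' (row.set i.toNat (pvTouch (PySem.List.pyGetD row i "")))
    have hlen : (row.set i.toNat (pvTouch (PySem.List.pyGetD row i ""))).length = row.length :=
      List.length_set
    refine ⟨by rw [ihlen, hlen], ?_⟩
    intro c
    rw [ihget c, hlen]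
    have hsetD :
        (row.set i.toNat (pvTouch (PySem.List.pyGetD row i ""))).getD c "" =
        if i.toNat = c ∧ i.toNat < row.length then pvTouch (PySem.List.pyGetD row i "") else row.getD c "" := by
      rw [List.getD_eq_getElem?_getD, List.getElem?_set, List.getD_eq_getElem?_getD]
      split_ifs with h1 h2 h3 h3
      all_goals simp_all
      all_goals (exfalso; omega)
    rw [hsetD]
    by_cases hci : (c : Int) = i
    · have hcn : i.toNat = c := by omega
      have hcl : (c : Int) ∉ l := by rw [hci]; exact hil
      by_cases hcr : c < row.length
      · have hg : PySem.List.pyGetD row i "" = row.getD c "" := by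
          rw [← hci, PySem.List.pyGetD_natCast]
        simp [hil, hcn, hcr, hg, hci]
      · simp [hcl, hcr, hcn]
    · have hcn : i.toNat ≠ c := by omega
      simp [List.mem_cons, hci, hcn]

lemma pv_colfold_pull (l : List Int) :
    ∀ (nf : List (List String)) (rowI : Int), 0 ≤ rowI → rowI.toNat < nf.length →
    l.foldl (fun nf colI =>
      PySem.List.pySetD nf rowI
        (PySem.List.pySetD (PySem.List.pyGetD nf rowI []) colI
          (if PySem.List.pyGetD (PySem.List.pyGetD nf rowI []) colI "" == "." then "x" else "X"))) nf
    = PySem.List.pySetD nf rowI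
        (l.foldl (fun row colI => PySem.List.pySetD row colI
          (if PySem.List.pyGetD row colI "" == "." then "x" else "X")) (PySem.List.pyGetD nf rowI [])) := by
  induction l with
  | nil =>
    intro nf rowI h0 hlt
    rw [List.foldl_nil, List.foldl_nil, PySem.List.pySetD_of_nonneg nf _ h0,
      PySem.List.pyGetD_eq_getElem nf [] h0 (by omega)]
    exact (List.set_getElem_self hlt).symm
  | cons c l ih =>
    intro nf rowI h0 hlt
    rw [List.foldl_cons, List.foldl_cons]
    have hg : PySem.List.pyGetD nf rowI [] = nf[rowI.toNat] :=
      PySem.List.pyGetD_eq_getElem nf [] h0 (by omega)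
    set R' := PySem.List.pySetD (PySem.List.pyGetD nf rowI []) c
        (if PySem.List.pyGetD (PySem.List.pyGetD nf rowI []) c "" == "." then "x" else "X") with hR
    have hset : PySem.List.pySetD nf rowI R' = nf.set rowI.toNat R' :=
      PySem.List.pySetD_of_nonneg nf _ h0
    rw [hset]
    have hlen : rowI.toNat < (nf.set rowI.toNat R').length := by simpa using hlt
    rw [ih (nf.set rowI.toNat R') rowI h0 hlen]
    have hg' : PySem.List.pyGetD (nf.set rowI.toNat R') rowI [] = R' := by
      rw [PySem.List.pyGetD_eq_getElem _ [] h0 (by simp only [List.length_set]; omega)]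
      exact List.getElem_set_self (by simpa using hlt)
    rw [hg', PySem.List.pySetD_of_nonneg _ _ h0, PySem.List.pySetD_of_nonneg _ _ h0,
      List.set_set]

lemma pv_getD_set_char {α : Type} (l : List α) (j r : Nat) (v d : α) :
    (l.set j v).getD r d = if j = r ∧ j < l.length then v else l.getD r d := by
  rw [List.getD_eq_getElem?_getD, List.getElem?_set, List.getD_eq_getElem?_getD]
  split_ifs <;> simp_all
  omega

def pvRowGo (w e : Int) (row : List String) : List String :=
  (PySem.List.pyRange w ((row.length : Int) - e) 1).foldl
    (fun row colI => PySem.List.pySetD row colI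
      (if PySem.List.pyGetD row colI "" == "." then "x" else "X")) row

lemma pvRowGo_char (w e : Int) (hw : 0 ≤ w) (he : 0 ≤ e) (row : List String) :
    (pvRowGo w e row).length = row.length ∧
    ∀ c : Nat, (pvRowGo w e row).getD c "" =
      if w ≤ (c : Int) ∧ (c : Int) < (row.length : Int) - e
      then pvTouch (row.getD c "") else row.getD c "" := by
  obtain ⟨h1, h2⟩ := pv_colfold_char (PySem.List.pyRange w ((row.length : Int) - e) 1)
    (PySem.List.nodup_pyRange_one _ _)
    (fun i hi => le_trans hw (PySem.List.mem_pyRange_one.mp hi).1) row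
  refine ⟨h1, fun c => ?_⟩
  rw [pvRowGo, h2 c]
  by_cases hc : w ≤ (c : Int) ∧ (c : Int) < (row.length : Int) - e
  · rw [if_pos ⟨PySem.List.mem_pyRange_one.mpr hc, by omega⟩, if_pos hc]
  · rw [if_neg (fun h => hc (PySem.List.mem_pyRange_one.mp h.1)), if_neg hc]

lemma pv_rowfold_char (w e : Int) (hw : 0 ≤ w) (he : 0 ≤ e) (l : List Int) (hnd : l.Nodup) :
    ∀ nf : List (List String), (∀ i ∈ l, 0 ≤ i ∧ i < (nf.length : Int)) →
    ((l.foldl (fun nf rowI =>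
        (PySem.List.pyRange w (((PySem.List.pyGetD nf rowI []).length : Int) - e) 1).foldl
          (fun nf colI =>
            PySem.List.pySetD nf rowI
              (PySem.List.pySetD (PySem.List.pyGetD nf rowI []) colI
                (if PySem.List.pyGetD (PySem.List.pyGetD nf rowI []) colI "" == "." then "x" else "X")))
          nf) nf).length = nf.length) ∧
    ∀ r : Nat,
      ((l.foldl (fun nf rowI =>
        (PySem.List.pyRange w (((PySem.List.pyGetD nf rowI []).length : Int) - e) 1).foldl
          (fun nf colI =>
            PySem.List.pySetD nf rowI
              (PySem.List.pySetD (PySem.List.pyGetD nf rowI []) colI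
                (if PySem.List.pyGetD (PySem.List.pyGetD nf rowI []) colI "" == "." then "x" else "X")))
          nf) nf).getD r []).length = (nf.getD r []).length ∧
      ∀ c : Nat,
        ((l.foldl (fun nf rowI =>
          (PySem.List.pyRange w (((PySem.List.pyGetD nf rowI []).length : Int) - e) 1).foldl
            (fun nf colI =>
              PySem.List.pySetD nf rowI
                (PySem.List.pySetD (PySem.List.pyGetD nf rowI []) colI
                  (if PySem.List.pyGetD (PySem.List.pyGetD nf rowI []) colI "" == "." then "x" else "X")))
            nf) nf).getD r []).getD c "" =
        if (r : Int) ∈ l ∧ w ≤ (c : Int) ∧ (c : Int) < ((nf.getD r []).length : Int) - e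
        then pvTouch ((nf.getD r []).getD c "") else (nf.getD r []).getD c "" := by
  induction l with
  | nil => intro nf _; simp
  | cons i l ih =>
    intro nf hb
    obtain ⟨hil, hnd'⟩ := List.nodup_cons.mp hnd
    obtain ⟨hi0, hilt⟩ := hb i (by simp)
    have hitn : i.toNat < nf.length := by omega
    rw [List.foldl_cons]
    rw [pv_colfold_pull _ nf i hi0 hitn]
    have hg : PySem.List.pyGetD nf i [] = nf[i.toNat] :=
      PySem.List.pyGetD_eq_getElem nf [] hi0 (by omega)
    have hstep : PySem.List.pySetD nf i
        ((PySem.List.pyRange w (((PySem.List.pyGetD nf i []).length : Int) - e) 1).foldl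
          (fun row colI => PySem.List.pySetD row colI
            (if PySem.List.pyGetD row colI "" == "." then "x" else "X")) (PySem.List.pyGetD nf i []))
        = nf.set i.toNat (pvRowGo w e nf[i.toNat]) := by
      rw [PySem.List.pySetD_of_nonneg nf _ hi0, hg, pvRowGo]
    rw [hstep]
    set nf' := nf.set i.toNat (pvRowGo w e nf[i.toNat]) with hnf'
    have hlen' : nf'.length = nf.length := List.length_set
    obtain ⟨glen, grow⟩ := pvRowGo_char w e hw he nf[i.toNat]
    have hrowD : ∀ r : Nat, (nf'.getD r []).length = (nf.getD r []).length := by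
      intro r
      rw [hnf', pv_getD_set_char]
      split_ifs with h
      · obtain ⟨h1, h2⟩ := h
        subst h1
        rw [glen, List.getD_eq_getElem nf [] hitn]
      · rfl
    obtain ⟨ilen, irest⟩ := ih hnd' nf' (by rw [hlen']; exact fun j hj => hb j (by simp [hj]))
    refine ⟨by rw [ilen, hlen'], fun r => ?_⟩
    obtain ⟨rlen, rget⟩ := irest r
    refine ⟨by rw [rlen, hrowD r], fun c => ?_⟩
    rw [rget c, hrowD r]
    have hsetD : nf'.getD r [] = if i.toNat = r ∧ i.toNat < nf.length
        then pvRowGo w e nf[i.toNat] else nf.getD r [] := by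
      rw [hnf', pv_getD_set_char]
    by_cases hri : (r : Int) = i
    · have hrn : i.toNat = r := by omega
      have hrl : (r : Int) ∉ l := by rw [hri]; exact hil
      have hrowr : nf.getD r [] = nf[i.toNat] := by
        rw [← hrn, List.getD_eq_getElem nf [] hitn]
      have hsetD' : nf'.getD r [] = pvRowGo w e nf[i.toNat] := by
        rw [hsetD, if_pos ⟨hrn, hitn⟩]
      rw [if_neg (by rintro ⟨h, -⟩; exact hrl h), hsetD', grow c, hrowr]
      by_cases hc : w ≤ (c : Int) ∧ (c : Int) < (nf[i.toNat].length : Int) - e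
      · rw [if_pos hc, if_pos ⟨by simp [hri], hc⟩]
      · rw [if_neg hc, if_neg (by rintro ⟨-, h⟩; exact hc h)]
    · have hrn : i.toNat ≠ r := by omega
      have hsetD' : nf'.getD r [] = nf.getD r [] := by
        rw [hsetD, if_neg (by rintro ⟨h, -⟩; exact hrn h)]
      rw [hsetD']
      have hmem : ((r : Int) ∈ i :: l) ↔ ((r : Int) ∈ l) := by simp [hri]
      by_cases hc : (r : Int) ∈ l ∧ w ≤ (c : Int) ∧ (c : Int) < ((nf.getD r []).length : Int) - e
      · rw [if_pos hc, if_pos ⟨hmem.mpr hc.1, hc.2⟩]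
      · rw [if_neg hc, if_neg (fun h => hc ⟨hmem.mp h.1, h.2⟩)]

def pvHit (h w : Int) (m : List Int) (r c : Nat) : Bool :=
  decide ((m.getD 0 0 ≤ (r : Int) ∧ (r : Int) < h - m.getD 1 0) ∧
          m.getD 3 0 ≤ (c : Int) ∧ (c : Int) < w - m.getD 2 0)

def pvCnt (h w : Int) (ms : List (List Int)) (r c : Nat) : Nat :=
  ms.countP (fun m => pvHit h w m r c)

lemma pv_mine_char (mine : List Int) (nf : List (List String)) (hQ : pvQA nf mine) :
    ((PySem.List.pyRange (PySem.List.pyGetD mine 0 0)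
        ((nf.length : Int) - PySem.List.pyGetD mine 1 0) 1).foldl (fun nf rowI =>
      (PySem.List.pyRange (PySem.List.pyGetD mine 3 0)
          (((PySem.List.pyGetD nf rowI []).length : Int) - PySem.List.pyGetD mine 2 0) 1).foldl
        (fun nf colI =>
          PySem.List.pySetD nf rowI
            (PySem.List.pySetD (PySem.List.pyGetD nf rowI []) colI
              (if PySem.List.pyGetD (PySem.List.pyGetD nf rowI []) colI "" == "." then "x" else "X")))
        nf) nf).length = nf.length ∧
    ∀ r c : Nat,
      (((PySem.List.pyRange (PySem.List.pyGetD mine 0 0)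
        ((nf.length : Int) - PySem.List.pyGetD mine 1 0) 1).foldl (fun nf rowI =>
      (PySem.List.pyRange (PySem.List.pyGetD mine 3 0)
          (((PySem.List.pyGetD nf rowI []).length : Int) - PySem.List.pyGetD mine 2 0) 1).foldl
        (fun nf colI =>
          PySem.List.pySetD nf rowI
            (PySem.List.pySetD (PySem.List.pyGetD nf rowI []) colI
              (if PySem.List.pyGetD (PySem.List.pyGetD nf rowI []) colI "" == "." then "x" else "X")))
        nf) nf).getD r []).length = (nf.getD r []).length ∧
      (((PySem.List.pyRange (PySem.List.pyGetD mine 0 0)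
        ((nf.length : Int) - PySem.List.pyGetD mine 1 0) 1).foldl (fun nf rowI =>
      (PySem.List.pyRange (PySem.List.pyGetD mine 3 0)
          (((PySem.List.pyGetD nf rowI []).length : Int) - PySem.List.pyGetD mine 2 0) 1).foldl
        (fun nf colI =>
          PySem.List.pySetD nf rowI
            (PySem.List.pySetD (PySem.List.pyGetD nf rowI []) colI
              (if PySem.List.pyGetD (PySem.List.pyGetD nf rowI []) colI "" == "." then "x" else "X")))
        nf) nf).getD r []).getD c "" =
      if pvHit (nf.length : Int) ((nf.getD r []).length : Int) mine r c
      then pvTouch ((nf.getD r []).getD c "") else (nf.getD r []).getD c "" := by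
  have hg0 : PySem.List.pyGetD mine 0 0 = mine.getD 0 0 := PySem.List.pyGetD_zero mine 0
  have hg1 : PySem.List.pyGetD mine 1 0 = mine.getD 1 0 := PySem.List.pyGetD_ofNat' mine 1 0
  have hg2 : PySem.List.pyGetD mine 2 0 = mine.getD 2 0 := PySem.List.pyGetD_ofNat' mine 2 0
  have hg3 : PySem.List.pyGetD mine 3 0 = mine.getD 3 0 := PySem.List.pyGetD_ofNat' mine 3 0
  rw [hg0, hg1, hg2, hg3]
  unfold pvQA at hQ
  rcases hQ with hempty | ⟨hn0, hs0, hcol⟩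
  · -- the mine's row range is empty: the mine touches nothing and hits nothing
    have hrng : PySem.List.pyRange (mine.getD 0 0)
        ((nf.length : Int) - mine.getD 1 0) 1 = [] := by
      rw [PySem.List.pyRange_one]
      rw [show ((nf.length : Int) - mine.getD 1 0 - mine.getD 0 0).toNat = 0 from by omega]
      rfl
    rw [hrng, List.foldl_nil]
    refine ⟨rfl, fun r c => ⟨rfl, ?_⟩⟩
    rw [if_neg ?_]
    unfold pvHit
    simp only [decide_eq_true_eq]
    rintro ⟨⟨h1, h2⟩, -⟩
    omega
  · rcases hcol with ⟨h3, h2⟩ | hiii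
    · -- documented case: four nonnegative distances
      obtain ⟨flen, frest⟩ := pv_rowfold_char (mine.getD 3 0) (mine.getD 2 0) h3 h2
        (PySem.List.pyRange (mine.getD 0 0) ((nf.length : Int) - mine.getD 1 0) 1)
        (PySem.List.nodup_pyRange_one _ _) nf
        (fun i hi => by
          obtain ⟨ha, hb⟩ := PySem.List.mem_pyRange_one.mp hi
          constructor <;> omega)
      refine ⟨flen, fun r c => ?_⟩
      obtain ⟨rlen, rget⟩ := frest r
      refine ⟨rlen, ?_⟩
      rw [rget c]
      unfold pvHit
      by_cases hh : (mine.getD 0 0 ≤ (r : Int) ∧ (r : Int) < (nf.length : Int) - mine.getD 1 0) ∧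
          mine.getD 3 0 ≤ (c : Int) ∧ (c : Int) < ((nf.getD r []).length : Int) - mine.getD 2 0
      · rw [if_pos ⟨PySem.List.mem_pyRange_one.mpr hh.1, hh.2⟩, if_pos (by simpa using hh)]
      · rw [if_neg (fun h => hh ⟨PySem.List.mem_pyRange_one.mp h.1, h.2⟩), if_neg (by simpa using hh)]
    · -- every column range on an affected row is empty: the mine touches nothing
      have hrows : ∀ i ∈ PySem.List.pyRange (mine.getD 0 0)
          ((nf.length : Int) - mine.getD 1 0) 1,
          (PySem.List.pyRange (mine.getD 3 0)
            (((PySem.List.pyGetD nf i []).length : Int) - mine.getD 2 0) 1).foldl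
          (fun nf colI =>
            PySem.List.pySetD nf i
              (PySem.List.pySetD (PySem.List.pyGetD nf i []) colI
                (if PySem.List.pyGetD (PySem.List.pyGetD nf i []) colI "" == "." then "x" else "X")))
          nf = nf := by
        intro i hi
        obtain ⟨hi1, hi2⟩ := PySem.List.mem_pyRange_one.mp hi
        have hi0 : 0 ≤ i := le_trans hn0 hi1
        have hilt : i.toNat < nf.length := by omega
        have hgi : PySem.List.pyGetD nf i [] = nf.getD i.toNat [] := by
          rw [PySem.List.pyGetD_eq_getElem nf [] hi0 (by omega),
            List.getD_eq_getElem nf [] hilt]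
        have hwid := hiii i.toNat hilt (by constructor <;> omega)
        have hrng : PySem.List.pyRange (mine.getD 3 0)
            (((PySem.List.pyGetD nf i []).length : Int) - mine.getD 2 0) 1 = [] := by
          rw [PySem.List.pyRange_one, hgi]
          rw [show (((nf.getD i.toNat []).length : Int) - mine.getD 2 0 - mine.getD 3 0).toNat = 0
            from by omega]
          rfl
        rw [hrng, List.foldl_nil]
      rw [pv_foldl_id _ _ _ hrows]
      refine ⟨rfl, fun r c => ⟨rfl, ?_⟩⟩
      rw [if_neg ?_]
      unfold pvHit
      simp only [decide_eq_true_eq]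
      rintro ⟨⟨h1, h2⟩, hc1, hc2⟩
      have := hiii r (by omega) ⟨h1, h2⟩
      omega

lemma pv_A_char (mf : List (List String)) (ms : List (List Int))
    (hpre : ∀ m ∈ ms, pvQA mf m) :
    ∀ nf : List (List String), nf.length = mf.length →
      (∀ r : Nat, (nf.getD r []).length = (mf.getD r []).length) →
    ((ms.foldl (fun nf mine =>
      (PySem.List.pyRange (PySem.List.pyGetD mine 0 0)
          ((nf.length : Int) - PySem.List.pyGetD mine 1 0) 1).foldl (fun nf rowI =>
        (PySem.List.pyRange (PySem.List.pyGetD mine 3 0)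
            (((PySem.List.pyGetD nf rowI []).length : Int) - PySem.List.pyGetD mine 2 0) 1).foldl
          (fun nf colI =>
            PySem.List.pySetD nf rowI
              (PySem.List.pySetD (PySem.List.pyGetD nf rowI []) colI
                (if PySem.List.pyGetD (PySem.List.pyGetD nf rowI []) colI "" == "." then "x" else "X")))
          nf) nf) nf).length = nf.length) ∧
    ∀ r c : Nat,
      ((ms.foldl (fun nf mine =>
        (PySem.List.pyRange (PySem.List.pyGetD mine 0 0)
            ((nf.length : Int) - PySem.List.pyGetD mine 1 0) 1).foldl (fun nf rowI =>
          (PySem.List.pyRange (PySem.List.pyGetD mine 3 0)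
              (((PySem.List.pyGetD nf rowI []).length : Int) - PySem.List.pyGetD mine 2 0) 1).foldl
            (fun nf colI =>
              PySem.List.pySetD nf rowI
                (PySem.List.pySetD (PySem.List.pyGetD nf rowI []) colI
                  (if PySem.List.pyGetD (PySem.List.pyGetD nf rowI []) colI "" == "." then "x" else "X")))
            nf) nf) nf).getD r []).length = (nf.getD r []).length ∧
      ((ms.foldl (fun nf mine =>
        (PySem.List.pyRange (PySem.List.pyGetD mine 0 0)
            ((nf.length : Int) - PySem.List.pyGetD mine 1 0) 1).foldl (fun nf rowI =>
          (PySem.List.pyRange (PySem.List.pyGetD mine 3 0)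
              (((PySem.List.pyGetD nf rowI []).length : Int) - PySem.List.pyGetD mine 2 0) 1).foldl
            (fun nf colI =>
              PySem.List.pySetD nf rowI
                (PySem.List.pySetD (PySem.List.pyGetD nf rowI []) colI
                  (if PySem.List.pyGetD (PySem.List.pyGetD nf rowI []) colI "" == "." then "x" else "X")))
            nf) nf) nf).getD r []).getD c "" =
        pvTouch^[pvCnt (nf.length : Int) ((nf.getD r []).length : Int) ms r c]
          ((nf.getD r []).getD c "") := by
  induction ms with
  | nil => intro nf _ _; simp [pvCnt]
  | cons m ms ih =>
    intro nf hsl hsw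
    have hQm : pvQA nf m := by
      have h := hpre m (by simp)
      unfold pvQA at h ⊢
      rw [hsl]
      rcases h with he | ⟨hn, hs, hcc⟩
      · exact Or.inl he
      · refine Or.inr ⟨hn, hs, ?_⟩
        rcases hcc with h23 | hiii
        · exact Or.inl h23
        · refine Or.inr (fun r hr hrow => ?_)
          rw [hsw r]
          exact hiii r (by omega) hrow
    have hpre' : ∀ m' ∈ ms, pvQA mf m' := fun m' hm' => hpre m' (by simp [hm'])
    obtain ⟨slen, srest⟩ := pv_mine_char m nf hQm
    rw [List.foldl_cons]
    set nf1 := (PySem.List.pyRange (PySem.List.pyGetD m 0 0)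
          ((nf.length : Int) - PySem.List.pyGetD m 1 0) 1).foldl (fun nf rowI =>
        (PySem.List.pyRange (PySem.List.pyGetD m 3 0)
            (((PySem.List.pyGetD nf rowI []).length : Int) - PySem.List.pyGetD m 2 0) 1).foldl
          (fun nf colI =>
            PySem.List.pySetD nf rowI
              (PySem.List.pySetD (PySem.List.pyGetD nf rowI []) colI
                (if PySem.List.pyGetD (PySem.List.pyGetD nf rowI []) colI "" == "." then "x" else "X")))
          nf) nf with hnf1
    obtain ⟨ilen, irest⟩ := ih hpre' nf1 (by rw [slen, hsl])
      (fun r => by rw [(srest r 0).1, hsw r])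
    refine ⟨by rw [ilen, slen], fun r c => ?_⟩
    obtain ⟨srlen, srget⟩ := srest r c
    obtain ⟨irlen, irget⟩ := irest r c
    refine ⟨by rw [irlen, srlen], ?_⟩
    rw [irget, slen, srlen, srget]
    have hcnt : pvCnt (nf.length : Int) ((nf.getD r []).length : Int) (m :: ms) r c =
        pvCnt (nf.length : Int) ((nf.getD r []).length : Int) ms r c +
        (if pvHit (nf.length : Int) ((nf.getD r []).length : Int) m r c then 1 else 0) := by
      unfold pvCnt
      rw [List.countP_cons]
    rw [hcnt]
    by_cases hh : pvHit (nf.length : Int) ((nf.getD r []).length : Int) m r c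
    · rw [if_pos hh, if_pos hh, ← Function.iterate_succ_apply]
    · rw [if_neg hh, if_neg hh, Nat.add_zero]

def pvPS (diff : List Int) (n : Nat) : Int := (diff.take n).sum

lemma pvPS_succ (diff : List Int) (n : Nat) :
    pvPS diff (n + 1) = pvPS diff n + diff.getD n 0 := by
  by_cases h : n < diff.length
  · rw [pvPS, pvPS, List.sum_take_succ diff n h, List.getD_eq_getElem diff 0 h]
  · rw [pvPS, pvPS, List.take_of_length_le (by omega), List.take_of_length_le (by omega),
      List.getD_eq_default _ _ (by omega), add_zero]

lemma pv_sum_set (l : List Int) (j : Nat) (v : Int) :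
    ∀ n : Nat, ((l.set j v).take n).sum =
      (l.take n).sum + (if j < n ∧ j < l.length then v - l.getD j 0 else 0) := by
  induction l generalizing j v with
  | nil => simp
  | cons a l ih =>
    intro n
    match j, n with
    | 0, 0 => simp
    | 0, n + 1 => simp [List.set_cons_zero, List.take_succ_cons]; ring
    | j + 1, 0 => simp
    | j + 1, n + 1 =>
      rw [List.set_cons_succ, List.take_succ_cons, List.take_succ_cons, List.sum_cons,
        List.sum_cons, ih j v n]
      simp only [List.getD_cons_succ, List.length_cons, Nat.add_lt_add_iff_right]
      ring

lemma pvPS_set (diff : List Int) (i δ : Int) (h0 : 0 ≤ i) (hl : i < (diff.length : Int)) (n : Nat) :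
    pvPS (PySem.List.pySetD diff i (PySem.List.pyGetD diff i 0 + δ)) n =
    pvPS diff n + (if i < (n : Int) then δ else 0) := by
  rw [PySem.List.pySetD_of_nonneg diff _ h0, pvPS, pvPS, pv_sum_set diff i.toNat _ n,
    PySem.List.pyGetD_eq_getElem diff 0 h0 hl, List.getD_eq_getElem diff 0 (by omega)]
  split_ifs with h1 h2 h2
  · ring
  · exfalso; omega
  · exfalso; omega
  · ring

lemma pv_diff_char (H W rn : Nat) (ms : List (List Int))
    (hpre : ∀ m ∈ ms, pvQ (H : Int) (W : Int) rn m) :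
    ∀ diff : List Int, diff.length = W + 1 →
    ((ms.foldl (fun diff mine =>
        if PySem.List.pyGetD mine 0 0 ≤ (rn : Int) ∧
           (rn : Int) < (H : Int) - PySem.List.pyGetD mine 1 0 ∧
           PySem.List.pyGetD mine 3 0 < (W : Int) - PySem.List.pyGetD mine 2 0 then
          PySem.List.pySetD
            (PySem.List.pySetD diff (PySem.List.pyGetD mine 3 0)
              (PySem.List.pyGetD diff (PySem.List.pyGetD mine 3 0) 0 + 1))
            ((W : Int) - PySem.List.pyGetD mine 2 0)
            (PySem.List.pyGetD
              (PySem.List.pySetD diff (PySem.List.pyGetD mine 3 0)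
                (PySem.List.pyGetD diff (PySem.List.pyGetD mine 3 0) 0 + 1))
              ((W : Int) - PySem.List.pyGetD mine 2 0) 0 - 1)
        else diff) diff).length = W + 1) ∧
    ∀ c : Nat,
      pvPS (ms.foldl (fun diff mine =>
        if PySem.List.pyGetD mine 0 0 ≤ (rn : Int) ∧
           (rn : Int) < (H : Int) - PySem.List.pyGetD mine 1 0 ∧
           PySem.List.pyGetD mine 3 0 < (W : Int) - PySem.List.pyGetD mine 2 0 then
          PySem.List.pySetD
            (PySem.List.pySetD diff (PySem.List.pyGetD mine 3 0)
              (PySem.List.pyGetD diff (PySem.List.pyGetD mine 3 0) 0 + 1))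
            ((W : Int) - PySem.List.pyGetD mine 2 0)
            (PySem.List.pyGetD
              (PySem.List.pySetD diff (PySem.List.pyGetD mine 3 0)
                (PySem.List.pyGetD diff (PySem.List.pyGetD mine 3 0) 0 + 1))
              ((W : Int) - PySem.List.pyGetD mine 2 0) 0 - 1)
        else diff) diff) (c + 1) =
      pvPS diff (c + 1) + (pvCnt (H : Int) (W : Int) ms rn c : Int) := by
  induction ms with
  | nil => intro diff hd; refine ⟨hd, fun c => by simp [pvCnt]⟩
  | cons m ms ih =>
    intro diff hd
    have hQm : pvQ (H : Int) (W : Int) rn m := hpre m (by simp)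
    unfold pvQ at hQm
    have hpre' : ∀ m' ∈ ms, pvQ (H : Int) (W : Int) rn m' :=
      fun m' hm' => hpre m' (by simp [hm'])
    rw [List.foldl_cons]
    have hg0 : PySem.List.pyGetD m 0 0 = m.getD 0 0 := PySem.List.pyGetD_zero m 0
    have hg1 : PySem.List.pyGetD m 1 0 = m.getD 1 0 := PySem.List.pyGetD_ofNat' m 1 0
    have hg2 : PySem.List.pyGetD m 2 0 = m.getD 2 0 := PySem.List.pyGetD_ofNat' m 2 0
    have hg3 : PySem.List.pyGetD m 3 0 = m.getD 3 0 := PySem.List.pyGetD_ofNat' m 3 0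
    by_cases hc : PySem.List.pyGetD m 0 0 ≤ (rn : Int) ∧
        (rn : Int) < (H : Int) - PySem.List.pyGetD m 1 0 ∧
        PySem.List.pyGetD m 3 0 < (W : Int) - PySem.List.pyGetD m 2 0
    · rw [if_pos hc]
      rw [hg0, hg1, hg2, hg3] at hc
      have h23 : 0 ≤ m.getD 3 0 ∧ 0 ≤ m.getD 2 0 := by
        rcases hQm with he | ⟨hn, hs, hcc⟩
        · exfalso; omega
        · rcases hcc with h | himp
          · exact h
          · exfalso
            have := himp ⟨hc.1, hc.2.1⟩
            omega
      obtain ⟨h3, h2⟩ := h23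
      set d1 := PySem.List.pySetD diff (PySem.List.pyGetD m 3 0)
          (PySem.List.pyGetD diff (PySem.List.pyGetD m 3 0) 0 + 1) with hd1
      have hld1 : d1.length = W + 1 := by rw [hd1, PySem.List.length_pySetD, hd]
      set d2 := PySem.List.pySetD d1 ((W : Int) - PySem.List.pyGetD m 2 0)
          (PySem.List.pyGetD d1 ((W : Int) - PySem.List.pyGetD m 2 0) 0 - 1) with hd2
      have hld2 : d2.length = W + 1 := by rw [hd2, PySem.List.length_pySetD, hld1]
      obtain ⟨ilen, ips⟩ := ih hpre' d2 hld2
      refine ⟨ilen, fun c => ?_⟩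
      rw [ips c]
      have hps2 : pvPS d2 (c + 1) = pvPS d1 (c + 1) +
          (if (W : Int) - PySem.List.pyGetD m 2 0 < ((c + 1 : Nat) : Int) then (-1 : Int) else 0) := by
        rw [hd2, sub_eq_add_neg (PySem.List.pyGetD d1 _ 0) 1]
        exact pvPS_set d1 _ _ (by rw [hg2]; omega) (by rw [hld1, hg2]; push_cast; omega) (c + 1)
      have hps1 : pvPS d1 (c + 1) = pvPS diff (c + 1) +
          (if PySem.List.pyGetD m 3 0 < ((c + 1 : Nat) : Int) then (1 : Int) else 0) := by
        rw [hd1]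
        exact pvPS_set diff _ _ (by rw [hg3]; exact h3) (by rw [hd, hg3]; push_cast; omega) (c + 1)
      rw [hps2, hps1]
      have hcnt : (pvCnt (H : Int) (W : Int) (m :: ms) rn c : Int) =
          (pvCnt (H : Int) (W : Int) ms rn c : Int) +
          (if pvHit (H : Int) (W : Int) m rn c then 1 else 0) := by
        unfold pvCnt
        rw [List.countP_cons]
        split_ifs <;> push_cast <;> ring
      rw [hcnt]
      unfold pvHit
      rw [hg2, hg3]
      by_cases hh : (m.getD 0 0 ≤ (rn : Int) ∧ (rn : Int) < (H : Int) - m.getD 1 0) ∧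
          m.getD 3 0 ≤ (c : Int) ∧ (c : Int) < (W : Int) - m.getD 2 0
      · have hp1 : m.getD 3 0 < ((c + 1 : Nat) : Int) := by push_cast; omega
        have hp2 : ¬ ((W : Int) - m.getD 2 0 < ((c + 1 : Nat) : Int)) := by push_cast; omega
        rw [if_pos (show decide ((m.getD 0 0 ≤ (rn : Int) ∧ (rn : Int) < (H : Int) - m.getD 1 0) ∧
            m.getD 3 0 ≤ (c : Int) ∧ (c : Int) < (W : Int) - m.getD 2 0) = true by simpa using hh),
          if_pos hp1, if_neg hp2]
        ring
      · rw [if_neg (show ¬ (decide ((m.getD 0 0 ≤ (rn : Int) ∧ (rn : Int) < (H : Int) - m.getD 1 0) ∧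
            m.getD 3 0 ≤ (c : Int) ∧ (c : Int) < (W : Int) - m.getD 2 0) = true) by simpa using hh)]
        by_cases hw : m.getD 3 0 < ((c + 1 : Nat) : Int)
        · have hp : (W : Int) - m.getD 2 0 < ((c + 1 : Nat) : Int) := by push_cast at hw ⊢; omega
          rw [if_pos hw, if_pos hp]
          ring
        · have hp : ¬ ((W : Int) - m.getD 2 0 < ((c + 1 : Nat) : Int)) := by push_cast at hw ⊢; omega
          rw [if_neg hw, if_neg hp]
          ring
    · rw [if_neg hc]
      rw [hg0, hg1, hg2, hg3] at hc
      obtain ⟨ilen, ips⟩ := ih hpre' diff hd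
      refine ⟨ilen, fun c => ?_⟩
      rw [ips c]
      have hcnt : pvCnt (H : Int) (W : Int) (m :: ms) rn c =
          pvCnt (H : Int) (W : Int) ms rn c := by
        unfold pvCnt
        rw [List.countP_cons, if_neg ?_, Nat.add_zero]
        unfold pvHit
        simp only [decide_eq_true_eq]
        omega
      rw [hcnt]

def pvRowSpec (diff : List Int) : List String → Nat → Int → List String
  | [], _, _ => []
  | cell :: cs, j, acc =>
    (if (acc + diff.getD j 0) == 0 then cell
     else if (acc + diff.getD j 0) == 1 && cell == "." then "x" else "X") ::
    pvRowSpec diff cs (j + 1) (acc + diff.getD j 0)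

lemma pvRowSpec_length (diff : List Int) :
    ∀ (cells : List String) (j : Nat) (acc : Int),
    (pvRowSpec diff cells j acc).length = cells.length := by
  intro cells
  induction cells with
  | nil => intro j acc; rfl
  | cons cell cs ih => intro j acc; simp [pvRowSpec, ih]

lemma pv_enumfold (diff : List Int) :
    ∀ (cells : List String) (j : Nat) (acc : Int) (out : List String),
    ((PySem.List.enumerate cells (j : Int)).foldl (fun (st : Int × List String) q =>
      (st.1 + PySem.List.pyGetD diff q.1 0,
       st.2 ++ [if st.1 + PySem.List.pyGetD diff q.1 0 == 0 then q.2
                else if st.1 + PySem.List.pyGetD diff q.1 0 == 1 && q.2 == "." then "x"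
                else "X"])) (acc, out)).2
    = out ++ pvRowSpec diff cells j acc := by
  intro cells
  induction cells with
  | nil => intro j acc out; simp [PySem.List.enumerate_nil, pvRowSpec]
  | cons cell cs ih =>
    intro j acc out
    rw [PySem.List.enumerate_cons, List.foldl_cons]
    have hj : ((j : Int) + 1) = ((j + 1 : Nat) : Int) := by push_cast; ring
    have hg : PySem.List.pyGetD diff (j : Int) 0 = diff.getD j 0 :=
      PySem.List.pyGetD_natCast diff j 0
    simp only [hj, hg]
    rw [ih (j + 1) (acc + diff.getD j 0) _]
    simp [pvRowSpec]

lemma pvRowSpec_getD (diff : List Int) :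
    ∀ (cells : List String) (j c : Nat),
    (pvRowSpec diff cells j (pvPS diff j)).getD c "" =
      if c < cells.length then pvMark (cells.getD c "") (pvPS diff (j + c + 1)) else "" := by
  intro cells
  induction cells with
  | nil => intro j c; simp [pvRowSpec]
  | cons cell cs ih =>
    intro j c
    rw [pvRowSpec, ← pvPS_succ diff j]
    match c with
    | 0 => simp [pvMark]
    | c + 1 =>
      rw [List.getD_cons_succ, ih (j + 1) c]
      have : j + 1 + c + 1 = j + (c + 1) + 1 := by omega
      rw [this]
      simp

lemma pvHit_false_of_Q (H W : Int) (rn c : Nat) (m : List Int) (hQ : pvQ H W rn m)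
    (h : H ≤ (rn : Int) ∨ W ≤ (c : Int)) : pvHit H W m rn c = false := by
  unfold pvQ at hQ
  unfold pvHit
  simp only [decide_eq_false_iff_not]
  rintro ⟨⟨h1, h2⟩, h3, h4⟩
  rcases hQ with he | ⟨hn, hs, hcc⟩
  · omega
  · rcases hcc with ⟨hw3, hw2⟩ | himp
    · rcases h with h | h <;> omega
    · have := himp ⟨h1, h2⟩
      omega

lemma pvCnt_zero (H W : Int) (ms : List (List Int)) (rn c : Nat)
    (hq : ∀ m ∈ ms, pvQ H W rn m) (h : H ≤ (rn : Int) ∨ W ≤ (c : Int)) :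
    pvCnt H W ms rn c = 0 := by
  unfold pvCnt
  rw [List.countP_eq_zero]
  intro m hm
  simpa using pvHit_false_of_Q H W rn c m (hq m hm) h

def pvDiff (hgt wd r : Int) (ms : List (List Int)) : List Int :=
  ms.foldl (fun diff mine =>
    if PySem.List.pyGetD mine 0 0 ≤ r ∧ r < hgt - PySem.List.pyGetD mine 1 0 ∧
       PySem.List.pyGetD mine 3 0 < wd - PySem.List.pyGetD mine 2 0 then
      PySem.List.pySetD
        (PySem.List.pySetD diff (PySem.List.pyGetD mine 3 0)
          (PySem.List.pyGetD diff (PySem.List.pyGetD mine 3 0) 0 + 1))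
        (wd - PySem.List.pyGetD mine 2 0)
        (PySem.List.pyGetD
          (PySem.List.pySetD diff (PySem.List.pyGetD mine 3 0)
            (PySem.List.pyGetD diff (PySem.List.pyGetD mine 3 0) 0 + 1))
          (wd - PySem.List.pyGetD mine 2 0) 0 - 1)
    else diff) (List.replicate (wd + 1).toNat 0)

def pvRowOut (hgt : Int) (ms : List (List Int)) (p : Int × List String) : List String :=
  ((PySem.List.enumerate p.2 0).foldl (fun (st : Int × List String) q =>
    (st.1 + PySem.List.pyGetD (pvDiff hgt (p.2.length : Int) p.1 ms) q.1 0,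
     st.2 ++ [if st.1 + PySem.List.pyGetD (pvDiff hgt (p.2.length : Int) p.1 ms) q.1 0 == 0
              then q.2
              else if st.1 + PySem.List.pyGetD (pvDiff hgt (p.2.length : Int) p.1 ms) q.1 0 == 1
                      && q.2 == "." then "x"
              else "X"])) ((0 : Int), ([] : List String))).2

lemma pv_Brow_char (H : Nat) (ms : List (List Int)) (rn : Nat) (row : List String)
    (hpre : ∀ m ∈ ms, pvQ (H : Int) ((row.length : Nat) : Int) rn m) :
    (pvRowOut (H : Int) ms ((rn : Int), row)).length = row.length ∧
    ∀ c : Nat, (pvRowOut (H : Int) ms ((rn : Int), row)).getD c "" =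
      pvTouch^[pvCnt (H : Int) (row.length : Int) ms rn c] (row.getD c "") := by
  set W := row.length with hW
  have hdiff0 : ((W : Int) + 1).toNat = W + 1 := by omega
  have hrepl : (List.replicate (((W : Int)) + 1).toNat (0 : Int)).length = W + 1 := by
    rw [List.length_replicate, hdiff0]
  obtain ⟨hdl, hdps⟩ := pv_diff_char H W rn ms hpre
    (List.replicate (((W : Int)) + 1).toNat 0) hrepl
  have hps0 : ∀ n : Nat, pvPS (List.replicate (((W : Int)) + 1).toNat (0 : Int)) n = 0 := by
    intro n
    simp [pvPS, List.take_replicate, List.sum_replicate]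
  have hdiffeq : pvDiff (H : Int) (W : Int) (rn : Int) ms =
      (ms.foldl (fun diff mine =>
        if PySem.List.pyGetD mine 0 0 ≤ ((rn : Nat) : Int) ∧
           ((rn : Nat) : Int) < ((H : Nat) : Int) - PySem.List.pyGetD mine 1 0 ∧
           PySem.List.pyGetD mine 3 0 < ((W : Nat) : Int) - PySem.List.pyGetD mine 2 0 then
          PySem.List.pySetD
            (PySem.List.pySetD diff (PySem.List.pyGetD mine 3 0)
              (PySem.List.pyGetD diff (PySem.List.pyGetD mine 3 0) 0 + 1))
            (((W : Nat) : Int) - PySem.List.pyGetD mine 2 0)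
            (PySem.List.pyGetD
              (PySem.List.pySetD diff (PySem.List.pyGetD mine 3 0)
                (PySem.List.pyGetD diff (PySem.List.pyGetD mine 3 0) 0 + 1))
              (((W : Nat) : Int) - PySem.List.pyGetD mine 2 0) 0 - 1)
        else diff) (List.replicate (((W : Int)) + 1).toNat 0)) := rfl
  have henum := pv_enumfold (pvDiff (H : Int) (W : Int) (rn : Int) ms) row 0 0 []
  have hrowout : pvRowOut (H : Int) ms ((rn : Int), row) =
      pvRowSpec (pvDiff (H : Int) (W : Int) (rn : Int) ms) row 0 0 := by
    unfold pvRowOut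
    simp only [Nat.cast_zero] at henum
    rw [show ((rn : Int), row).2 = row from rfl] at *
    simpa using henum
  rw [hrowout]
  refine ⟨pvRowSpec_length _ _ _ _, fun c => ?_⟩
  have hacc : (0 : Int) = pvPS (pvDiff (H : Int) (W : Int) (rn : Int) ms) 0 := by
    simp [pvPS]
  rw [hacc, pvRowSpec_getD]
  by_cases hcW : c < W
  · rw [if_pos (by rw [← hW]; exact hcW)]
    rw [show (0 + c + 1) = c + 1 from by omega]
    have := hdps c
    rw [hps0 (c + 1), zero_add] at this
    rw [← hdiffeq] at this
    rw [this, ← pvTouch_iterate]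
  · rw [if_neg (by rw [← hW]; exact hcW)]
    rw [pvCnt_zero (H : Int) (W : Int) ms rn c hpre (Or.inr (by omega)),
      Function.iterate_zero_apply, List.getD_eq_default _ _ (by omega)]

lemma pv_B_map (mf : List (List String)) (ms : List (List Int)) :
    add_mines_alt mf ms =
      [] ++ (PySem.List.enumerate mf 0).map (pvRowOut (mf.length : Int) ms) :=
  PySem.List.foldl_append_singleton_eq_map (pvRowOut (mf.length : Int) ms)
    (PySem.List.enumerate mf 0) []

lemma pv_B_char (mf : List (List String)) (ms : List (List Int))
    (hpre : ∀ m ∈ ms, pvQA mf m) :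
    (add_mines_alt mf ms).length = mf.length ∧
    ∀ r c : Nat,
      ((add_mines_alt mf ms).getD r []).length = (mf.getD r []).length ∧
      ((add_mines_alt mf ms).getD r []).getD c "" =
        pvTouch^[pvCnt (mf.length : Int) (((mf.getD r []).length : Nat) : Int) ms r c]
          ((mf.getD r []).getD c "") := by
  rw [pv_B_map mf ms, List.nil_append]
  constructor
  · rw [List.length_map, PySem.List.length_enumerate]
  intro r c
  by_cases hr : r < mf.length
  · have hget : ((PySem.List.enumerate mf 0).map (pvRowOut (mf.length : Int) ms)).getD r [] =
        pvRowOut (mf.length : Int) ms ((r : Int), mf[r]) := by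
      rw [List.getD_eq_getElem?_getD, List.getElem?_map, PySem.List.getElem?_enumerate]
      simp [List.getElem?_eq_getElem hr]
    have hrowD : mf.getD r [] = mf[r] := List.getD_eq_getElem mf [] hr
    have hq : ∀ m ∈ ms, pvQ (mf.length : Int) ((mf[r].length : Nat) : Int) r m := by
      intro m hm
      have := pvQA_spec mf m (hpre m hm) r
      rwa [hrowD] at this
    obtain ⟨hbl, hbg⟩ := pv_Brow_char mf.length ms r mf[r] hq
    rw [hget, hrowD]
    exact ⟨hbl, hbg c⟩
  · have h1 : ((PySem.List.enumerate mf 0).map (pvRowOut (mf.length : Int) ms)).getD r [] = [] := by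
      apply List.getD_eq_default
      rw [List.length_map, PySem.List.length_enumerate]
      omega
    have h2 : mf.getD r [] = [] := List.getD_eq_default _ _ (by omega)
    rw [h1, h2]
    refine ⟨rfl, ?_⟩
    have hq : ∀ m ∈ ms, pvQ (mf.length : Int) ((([] : List String).length : Nat) : Int) r m := by
      intro m hm
      have := pvQA_spec mf m (hpre m hm) r
      rwa [h2] at this
    rw [pvCnt_zero _ _ ms r c hq (Or.inl (by omega)), Function.iterate_zero_apply]

lemma pv_A_char' (mf : List (List String)) (ms : List (List Int))
    (hpre : ∀ m ∈ ms, pvQA mf m) :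
    (add_mines mf ms).length = mf.length ∧
    ∀ r c : Nat,
      ((add_mines mf ms).getD r []).length = (mf.getD r []).length ∧
      ((add_mines mf ms).getD r []).getD c "" =
        pvTouch^[pvCnt (mf.length : Int) (((mf.getD r []).length : Nat) : Int) ms r c]
          ((mf.getD r []).getD c "") :=
  pv_A_char mf ms hpre mf rfl (fun _ => rfl)

lemma pv_eq_of_getD (xs ys : List (List String)) (hlen : xs.length = ys.length)
    (hrow : ∀ r : Nat, (xs.getD r []).length = (ys.getD r []).length)
    (hcell : ∀ r c : Nat, (xs.getD r []).getD c "" = (ys.getD r []).getD c "") : xs = ys := by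
  refine List.ext_getElem hlen (fun r h1 h2 => ?_)
  refine List.ext_getElem ?_ (fun c g1 g2 => ?_)
  · have := hrow r
    rwa [List.getD_eq_getElem xs [] h1, List.getD_eq_getElem ys [] h2] at this
  · have := hcell r c
    rwa [List.getD_eq_getElem xs [] h1, List.getD_eq_getElem ys [] h2,
      List.getD_eq_getElem _ "" g1, List.getD_eq_getElem _ "" g2] at this

lemma pv_main (mf : List (List String)) (ms : List (List Int))
    (hpre : ∀ m ∈ ms, pvQA mf m) :
    add_mines mf ms = add_mines_alt mf ms := by
  obtain ⟨hal, haget⟩ := pv_A_char' mf ms hpre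
  obtain ⟨hbl, hbget⟩ := pv_B_char mf ms hpre
  refine pv_eq_of_getD _ _ (hal.trans hbl.symm) (fun r => ?_) (fun r c => ?_)
  · rw [(haget r 0).1, (hbget r 0).1]
  · rw [(haget r c).2, (hbget r c).2]

-- ===== VERDICT (by name: the statement is the Claim_ definition above) =====
theorem add_mines_spec : Claim_equal_add_mines := by
  intro minefield mines _ hpre
  refine pv_main minefield mines (fun m hm => ?_)
  rcases (hpre m hm).2 with he | ⟨-, hrest⟩
  · exact Or.inl he
  · exact Or.inr hrest
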